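-- pv_equiv track=rewrite | github.com/ericmerle3789/Collatz-Junction-Theorem | scripts/research/r43_ehrhart_formulation.py | enumerate_monotone_B
-- ===== SOURCE A (Python) =====
-- def enumerate_monotone_B(k, max_B):
--     """Enumerate all monotone B-vectors with B_{k-1} = max_B.
--     0 <= B_0 <= B_1 <= ... <= B_{k-1} = max_B.
--     Returns list of tuples.
--     """
--     if k == 1:
--         return [(max_B,)]
--     results = []
--
--     def recurse(j, prev_b, current):
--         if j == k - 1:
--             current.append(max_B)
--             results.append(tuple(current))
--             current.pop()
--             return
--         for b in range(prev_b, max_B + 1):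
--             current.append(b)
--             recurse(j + 1, b, current)
--             current.pop()
--
--     recurse(0, 0, [])
--     return results
-- ===== SOURCE B (Python) =====
-- def enumerate_monotone_B(k, max_B):
--     """Build the vectors layer by layer: no vector of nonpositive length exists;
--     otherwise iteratively extend the list of nondecreasing prefixes k-1 times
--     (stopping early once none remain), then append max_B to each."""
--     if k < 1:
--         return []
--     prefixes = [()]
--     for _ in range(k - 1):
--         if not prefixes:
--             break
--         prefixes = [p + (b,)
--                     for p in prefixes
--                     for b in range(p[-1] if p else 0, max_B + 1)]
--     return [p + (max_B,) for p in prefixes]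
-- ===== Notes on version B (the rewrite author's own statement) =====
-- stated objective: simpler
-- what changed: Replaces A's recursive backtracking (with a shared mutable 'current' list) by an iterative layer-by-layer build: extend the list of nondecreasing prefixes k-1 times with a comprehension (stopping early once none remain), then append max_B to each.
import Mathlib
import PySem

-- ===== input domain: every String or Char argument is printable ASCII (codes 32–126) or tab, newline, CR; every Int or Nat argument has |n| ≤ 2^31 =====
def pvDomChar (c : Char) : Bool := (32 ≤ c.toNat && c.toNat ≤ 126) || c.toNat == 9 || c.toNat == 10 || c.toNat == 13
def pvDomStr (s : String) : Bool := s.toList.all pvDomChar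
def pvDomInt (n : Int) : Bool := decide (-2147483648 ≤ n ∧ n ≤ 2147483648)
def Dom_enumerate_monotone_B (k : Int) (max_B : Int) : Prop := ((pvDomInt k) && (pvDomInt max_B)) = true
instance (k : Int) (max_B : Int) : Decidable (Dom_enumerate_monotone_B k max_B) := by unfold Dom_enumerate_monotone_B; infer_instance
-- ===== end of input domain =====

-- B replaces A's recursive backtracking by an iterative layer-by-layer build of the
-- nondecreasing prefixes (objective: simpler); equivalence proved wherever A returns (Pre_ excludes
-- only the inputs on which A raises RecursionError).

-- ===== PORT A =====
-- A's inner 'recurse(j, prev_b, current)': the 'j == k - 1' base test is kept literally;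
-- fuel = k-1-j bounds the recursion depth (Python recurses without bound — and hence
-- diverges — only for k ≤ 0 with max_B ≥ 0, which Pre_ excludes)
def recurseA (k maxB : Int) (fuel : Nat) (j prev_b : Int) (current : List Int) (results : List (List Int)) : List (List Int) :=
  if j == k - 1 then results ++ [current ++ [maxB]]
  else
    match fuel with
    | 0 => results
    | n+1 =>
        (PySem.List.pyRange prev_b (maxB + 1) 1).foldl
          (fun res b => recurseA k maxB n (j + 1) b (current ++ [b]) res) results

def enumerate_monotone_B (k : Int) (max_B : Int) : List (List Int) :=
  if k == 1 then [[max_B]]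
  else recurseA k max_B (k - 1).toNat 0 0 [] []

-- ===== PORT B =====
-- 'p[-1] if p else 0'
def bFloor (p : List Int) : Int :=
  match p.getLast? with
  | some x => x
  | none => 0

-- one pass of the comprehension: extend every prefix by each admissible b
def bStep (maxB : Int) (ps : List (List Int)) : List (List Int) :=
  ps.flatMap (fun p => (PySem.List.pyRange (bFloor p) (maxB + 1) 1).map (fun b => p ++ [b]))

-- 'for _ in range(k - 1): if not prefixes: break; prefixes = …' — range(m) has m.toNat
-- iterations, and 'break' is the early exit on the empty list
def bLoop (maxB : Int) : Nat → List (List Int) → List (List Int)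
  | 0, ps => ps
  | n+1, ps => if ps = [] then ps else bLoop maxB n (bStep maxB ps)

-- 'if k < 1: return []': no vector of nonpositive length exists
def enumerate_monotone_B_alt (k : Int) (max_B : Int) : List (List Int) :=
  if k < 1 then []
  else (bLoop max_B (k - 1).toNat [[]]).map (fun p => p ++ [max_B])

-- ===== PRECONDITION & SPEC =====
-- Pre_ excludes only k ≤ 0 with max_B ≥ 0, where A's recursion never reaches its base
-- case j = k-1 and raises RecursionError.
def Pre_enumerate_monotone_B (k : Int) (max_B : Int) : Prop := 1 ≤ k ∨ max_B < 0
instance (k : Int) (max_B : Int) : Decidable (Pre_enumerate_monotone_B k max_B) := by unfold Pre_enumerate_monotone_B; infer_instance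
def pvWitness_enumerate_monotone_B : Int × Int := (3, 2)

def Spec_enumerate_monotone_B (k : Int) (max_B : Int) (out : List (List Int)) : Prop := out = enumerate_monotone_B_alt k max_B
instance (k : Int) (max_B : Int) (out : List (List Int)) : Decidable (Spec_enumerate_monotone_B k max_B out) := by unfold Spec_enumerate_monotone_B; infer_instance

-- ===== CLAIM (what is proved, stated in full; the proofs are below) =====
def Claim_equal_enumerate_monotone_B : Prop := ∀ (k : Int) (max_B : Int), Dom_enumerate_monotone_B k max_B → Pre_enumerate_monotone_B k max_B → Spec_enumerate_monotone_B k max_B (enumerate_monotone_B k max_B)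

-- ===== LEMMAS AND PROOFS =====

-- the common specification: eSpec maxB n prev = all nondecreasing length-n lists over [prev, maxB]
def eSpec (maxB : Int) : Nat → Int → List (List Int)
  | 0, _ => [[]]
  | n+1, prev =>
      (PySem.List.pyRange prev (maxB + 1) 1).flatMap
        (fun b => (eSpec maxB n b).map (fun s => b :: s))

-- B's step with the floor default made explicit
def stepP (maxB prev : Int) (ps : List (List Int)) : List (List Int) :=
  ps.flatMap (fun s => (PySem.List.pyRange (s.getLast?.getD prev) (maxB + 1) 1).map (fun b => s ++ [b]))

lemma bFloor_eq (p : List Int) : bFloor p = p.getLast?.getD 0 := by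
  cases h : p.getLast? <;> simp [bFloor, h]

lemma bStep_eq (maxB : Int) (ps : List (List Int)) : bStep maxB ps = stepP maxB 0 ps := by
  simp [bStep, stepP, bFloor_eq]

lemma getLastD_cons (b : Int) (s : List Int) (prev : Int) :
    (b :: s).getLast?.getD prev = s.getLast?.getD b := by
  cases s <;> simp [List.getLast?_cons]

lemma flatMap_pure (l : List Int) : l.flatMap (fun b => [[b]]) = l.map (fun b => [b]) := by
  induction l with
  | nil => rfl
  | cons b t ih => simp [ih]

lemma stepP_e (maxB : Int) : ∀ (n : Nat) (prev : Int),
    stepP maxB prev (eSpec maxB n prev) = eSpec maxB (n + 1) prev := by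
  intro n
  induction n with
  | zero =>
      intro prev
      simp [stepP, eSpec, flatMap_pure]
  | succ n ih =>
      intro prev
      show stepP maxB prev (eSpec maxB (n + 1) prev) = eSpec maxB (n + 2) prev
      simp only [eSpec, stepP] at *
      rw [List.flatMap_assoc]
      congr 1
      funext b
      rw [List.flatMap_map, ← ih b, List.map_flatMap]
      congr 1
      funext s
      simp [getLastD_cons, List.map_map, Function.comp]

lemma recurseA_e (k maxB : Int) : ∀ (n : Nat) (j prev : Int) (cur : List Int) (res : List (List Int)),
    j + (n : Int) = k - 1 →
    recurseA k maxB n j prev cur res = res ++ (eSpec maxB n prev).map (fun s => cur ++ s ++ [maxB]) := by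
  intro n
  induction n with
  | zero =>
      intro j prev cur res hj
      have : j = k - 1 := by omega
      simp [recurseA, this, eSpec]
  | succ n ih =>
      intro j prev cur res hj
      have hne : (j == k - 1) = false := by
        have : j ≠ k - 1 := by omega
        simpa using this
      rw [recurseA, hne]
      simp only [Bool.false_eq_true, if_false, eSpec]
      generalize PySem.List.pyRange prev (maxB + 1) 1 = l
      induction l generalizing res with
      | nil => simp
      | cons b t iht =>
          have hj' : (j + 1) + (n : Int) = k - 1 := by push_cast at hj ⊢; omega
          simp only [List.foldl_cons, List.flatMap_cons, List.map_append,
            ih (j + 1) _ _ _ hj', iht]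
          simp [List.flatMap, Function.comp_def, List.map_map, List.append_assoc]

lemma A_closed (k maxB : Int) (hk : 1 ≤ k) :
    enumerate_monotone_B k maxB = (eSpec maxB (k - 1).toNat 0).map (fun s => s ++ [maxB]) := by
  unfold enumerate_monotone_B
  by_cases h : k = 1
  · subst h; simp [eSpec]
  · have hb : (k == 1) = false := by simp [h]
    rw [hb]
    simp only [Bool.false_eq_true, if_false]
    rw [recurseA_e k maxB (k - 1).toNat 0 0 [] [] (by omega)]
    simp

lemma e_empty_persists (maxB : Int) : ∀ (j m : Nat), eSpec maxB m 0 = [] → eSpec maxB (j + m) 0 = [] := by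
  intro j
  induction j with
  | zero => intro m h; simpa using h
  | succ j ih =>
      intro m h
      have : j + 1 + m = (j + m) + 1 := by omega
      rw [this, ← stepP_e maxB (j + m) 0, ih m h]
      simp [stepP]

lemma bLoop_e (maxB : Int) : ∀ (n m : Nat), bLoop maxB n (eSpec maxB m 0) = eSpec maxB (n + m) 0 := by
  intro n
  induction n with
  | zero => intro m; simp [bLoop]
  | succ n ih =>
      intro m
      show bLoop maxB (n + 1) (eSpec maxB m 0) = eSpec maxB (n + 1 + m) 0
      rw [bLoop]
      by_cases h : eSpec maxB m 0 = []
      · rw [if_pos h, h, e_empty_persists maxB (n + 1) m h]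
      · rw [if_neg h, bStep_eq, stepP_e]
        have : n + (m + 1) = n + 1 + m := by omega
        rw [ih (m + 1), this]

lemma B_prefixes (maxB : Int) : ∀ (n : Nat), bLoop maxB n [[]] = eSpec maxB n 0 := by
  intro n
  have h0 : ([[]] : List (List Int)) = eSpec maxB 0 0 := rfl
  rw [h0, bLoop_e]
  norm_num

-- ===== VERDICT (by name: the statement is the Claim_ definition above) =====
theorem enumerate_monotone_B_spec : Claim_equal_enumerate_monotone_B := by
  intro k max_B _ hpre
  show enumerate_monotone_B k max_B = enumerate_monotone_B_alt k max_B
  by_cases hk : 1 ≤ k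
  · rw [A_closed k max_B hk]
    unfold enumerate_monotone_B_alt
    rw [if_neg (by omega), B_prefixes]
  · -- k ≤ 0, so Pre_ gives max_B < 0: A's first range is empty and B's guard fires
    have hm : max_B < 0 := by
      rcases hpre with h | h
      · exact absurd h hk
      · exact h
    have h1 : (k == 1) = false := by
      have : k ≠ 1 := by omega
      simpa using this
    have h2 : ((0 : Int) == k - 1) = false := by
      have : (0 : Int) ≠ k - 1 := by omega
      simpa using this
    have h3 : (k - 1).toNat = 0 := by omega
    unfold enumerate_monotone_B enumerate_monotone_B_alt
    rw [h1, h3]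
    simp only [Bool.false_eq_true, if_false]
    rw [recurseA, h2, if_pos (show k < 1 by omega)]
    simp
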